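-- pv_equiv track=rewrite | github.com/stark2/snake | src/ui.py | _bitmap_text_size
-- ===== SOURCE A (Python) =====
-- BITMAP_GLYPHS = {
--     " ": ["000", "000", "000", "000", "000"],
--     "(": ["010", "100", "100", "100", "010"],
--     ")": ["010", "001", "001", "001", "010"],
--     ":": ["000", "010", "000", "010", "000"],
--     "_": ["000", "000", "000", "000", "111"],
--     "0": ["111", "101", "101", "101", "111"],
--     "1": ["010", "110", "010", "010", "111"],
--     "2": ["111", "001", "111", "100", "111"],
--     "3": ["111", "001", "111", "001", "111"],
--     "4": ["101", "101", "111", "001", "001"],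
--     "5": ["111", "100", "111", "001", "111"],
--     "6": ["111", "100", "111", "101", "111"],
--     "7": ["111", "001", "001", "001", "001"],
--     "8": ["111", "101", "111", "101", "111"],
--     "9": ["111", "101", "111", "001", "111"],
--     "A": ["010", "101", "111", "101", "101"],
--     "D": ["110", "101", "101", "101", "110"],
--     "E": ["111", "100", "110", "100", "111"],
--     "G": ["111", "100", "101", "101", "111"],
--     "H": ["101", "101", "111", "101", "101"],
--     "I": ["111", "010", "010", "010", "111"],
--     "L": ["100", "100", "100", "100", "111"],
--     "M": ["101", "111", "111", "101", "101"],
--     "N": ["101", "111", "111", "111", "101"],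
--     "O": ["111", "101", "101", "101", "111"],
--     "R": ["110", "101", "110", "101", "101"],
--     "S": ["111", "100", "111", "001", "111"],
--     "T": ["111", "010", "010", "010", "010"],
--     "U": ["101", "101", "101", "101", "111"],
--     "V": ["101", "101", "101", "101", "010"],
-- }
--
-- def _bitmap_text_size(text: str, scale: int = 2, spacing: int = 1) -> tuple[int, int]:
--     width = 0
--     for index, char in enumerate(text.upper()):
--         glyph = BITMAP_GLYPHS.get(char, BITMAP_GLYPHS[" "])
--         width += len(glyph[0]) * scale
--         if index < len(text) - 1:
--             width += spacing * scale
--     height = len(next(iter(BITMAP_GLYPHS.values()))) * scale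
--     return width, height
-- ===== SOURCE B (Python) =====
-- def _bitmap_text_size(text: str, scale: int = 2, spacing: int = 1) -> tuple[int, int]:
--     # Closed form: every glyph is 3 columns wide and 5 rows tall, so no per-character loop is needed.
--     n = len(text)
--     width = n * 3 * scale + max(n - 1, 0) * spacing * scale
--     return width, 5 * scale
-- ===== Notes on version B (the rewrite author's own statement) =====
-- stated objective: faster
-- what changed: Replaces the per-character loop with a closed-form formula (every glyph is 3 columns wide and 5 rows tall), computing width and height in O(1).
import Mathlib
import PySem

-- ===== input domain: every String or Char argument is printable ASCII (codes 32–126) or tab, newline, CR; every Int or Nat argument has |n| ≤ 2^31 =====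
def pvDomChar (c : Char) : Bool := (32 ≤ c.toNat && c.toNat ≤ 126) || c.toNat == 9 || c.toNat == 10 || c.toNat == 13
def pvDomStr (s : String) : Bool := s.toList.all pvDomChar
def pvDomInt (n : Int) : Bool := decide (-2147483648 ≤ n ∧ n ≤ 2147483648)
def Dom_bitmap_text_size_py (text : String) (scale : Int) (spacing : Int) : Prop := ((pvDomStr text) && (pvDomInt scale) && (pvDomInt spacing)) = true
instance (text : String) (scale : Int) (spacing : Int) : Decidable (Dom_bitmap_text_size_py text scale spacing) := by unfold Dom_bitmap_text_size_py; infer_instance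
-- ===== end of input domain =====

-- B replaces A's per-character loop by a closed-form O(1) formula (every glyph is 3 columns wide, 5 rows tall).


-- ===== PORT A =====
-- BITMAP_GLYPHS: keys are 1-character strings in Python, represented by their Char; distinct keys, insertion order kept.
def pvGlyphs : PySem.Dict Char (List String) := PySem.Dict.mk
  [ (' ', ["000", "000", "000", "000", "000"]),
    ('(', ["010", "100", "100", "100", "010"]),
    (')', ["010", "001", "001", "001", "010"]),
    (':', ["000", "010", "000", "010", "000"]),
    ('_', ["000", "000", "000", "000", "111"]),
    ('0', ["111", "101", "101", "101", "111"]),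
    ('1', ["010", "110", "010", "010", "111"]),
    ('2', ["111", "001", "111", "100", "111"]),
    ('3', ["111", "001", "111", "001", "111"]),
    ('4', ["101", "101", "111", "001", "001"]),
    ('5', ["111", "100", "111", "001", "111"]),
    ('6', ["111", "100", "111", "101", "111"]),
    ('7', ["111", "001", "001", "001", "001"]),
    ('8', ["111", "101", "111", "101", "111"]),
    ('9', ["111", "101", "111", "001", "111"]),
    ('A', ["010", "101", "111", "101", "101"]),
    ('D', ["110", "101", "101", "101", "110"]),
    ('E', ["111", "100", "110", "100", "111"]),
    ('G', ["111", "100", "101", "101", "111"]),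
    ('H', ["101", "101", "111", "101", "101"]),
    ('I', ["111", "010", "010", "010", "111"]),
    ('L', ["100", "100", "100", "100", "111"]),
    ('M', ["101", "111", "111", "101", "101"]),
    ('N', ["101", "111", "111", "111", "101"]),
    ('O', ["111", "101", "101", "101", "111"]),
    ('R', ["110", "101", "110", "101", "101"]),
    ('S', ["111", "100", "111", "001", "111"]),
    ('T', ["111", "010", "010", "010", "010"]),
    ('U', ["101", "101", "101", "101", "111"]),
    ('V', ["101", "101", "101", "101", "010"]) ]

-- BITMAP_GLYPHS[" "]: the key ' ' is present, so the .getD default is never used.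
def pvSpaceGlyph : List String := (pvGlyphs.get? ' ').getD []

def bitmap_text_size_py (text : String) (scale : Int) (spacing : Int) : Int × Int :=
  let n : Int := PySem.Str.len text
  let width : Int :=
    (PySem.List.enumerate (PySem.Str.upper text).toList).foldl
      (fun w p =>
        let glyph := (pvGlyphs.get? p.2).getD pvSpaceGlyph
        w + PySem.Str.len (PySem.List.pyGetD glyph 0 "") * scale +
          (if p.1 < n - 1 then spacing * scale else 0))
      0
  let height : Int := ((pvGlyphs.values.headD []).length : Int) * scale
  (width, height)

-- ===== PORT B =====
def bitmap_text_size_py_alt (text : String) (scale : Int) (spacing : Int) : Int × Int :=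
  let n : Int := PySem.Str.len text
  (n * 3 * scale + (max (n - 1) 0) * spacing * scale, 5 * scale)

-- ===== PRECONDITION & SPEC =====
def Spec_bitmap_text_size_py (text : String) (scale : Int) (spacing : Int) (out : Int × Int) : Prop := out = bitmap_text_size_py_alt text scale spacing
instance (text : String) (scale : Int) (spacing : Int) (out : Int × Int) : Decidable (Spec_bitmap_text_size_py text scale spacing out) := by unfold Spec_bitmap_text_size_py; infer_instance

-- ===== CLAIM (what is proved, stated in full; the proofs are below) =====
def Claim_equal_bitmap_text_size_py : Prop := ∀ (text : String) (scale : Int) (spacing : Int), Dom_bitmap_text_size_py text scale spacing → Spec_bitmap_text_size_py text scale spacing (bitmap_text_size_py text scale spacing)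

-- ===== LEMMAS AND PROOFS =====

-- Every glyph (and the default) has first row of length 3.
theorem pvSpaceGlyph_eq : pvSpaceGlyph = ["000", "000", "000", "000", "000"] := by decide

-- get? on a literal dict returns one of its values, or the default.
theorem pvGetD_forall {κ ν : Type} [BEq κ] (l : List (κ × ν)) (P : ν → Prop) (k : κ) (dflt : ν)
    (hv : ∀ p ∈ l, P p.2) (hd : P dflt) : P (((PySem.Dict.mk l).get? k).getD dflt) := by
  induction l with
  | nil => simpa [PySem.Dict.get?] using hd
  | cons q rest ih =>
    rw [PySem.Dict.get?_mk_cons]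
    by_cases h : (q.1 == k) = true
    · simpa [h] using hv q (List.mem_cons_self ..)
    · simpa [h] using ih (fun p hp => hv p (List.mem_cons_of_mem _ hp))

theorem pvGlyph_len (c : Char) :
    PySem.Str.len (PySem.List.pyGetD ((pvGlyphs.get? c).getD pvSpaceGlyph) 0 "") = 3 := by
  rw [pvSpaceGlyph_eq]
  unfold pvGlyphs
  exact pvGetD_forall _ (fun v => PySem.Str.len (PySem.List.pyGetD v 0 "") = 3) c _
    (by decide) (by decide)

-- A's loop over enumerate, with k the next index and k + length = n.
theorem pvLoop_eq (scale spacing n : Int) (cs : List Char) :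
    ∀ (k acc : Int), k + cs.length = n →
      (PySem.List.enumerate cs k).foldl
        (fun w p =>
          let glyph := (pvGlyphs.get? p.2).getD pvSpaceGlyph
          w + PySem.Str.len (PySem.List.pyGetD glyph 0 "") * scale +
            (if p.1 < n - 1 then spacing * scale else 0)) acc
      = acc + cs.length * 3 * scale + (max ((cs.length : Int) - 1) 0) * spacing * scale := by
  induction cs with
  | nil => intro k acc h; simp [PySem.List.enumerate_nil]
  | cons c rest ih =>
    intro k acc h
    rw [PySem.List.enumerate_cons, List.foldl_cons]
    simp only [pvGlyph_len] at ih ⊢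
    rw [ih (k + 1) _ (by simp at h ⊢; omega)]
    rcases rest with _ | ⟨d, rest'⟩
    · have hk : ¬ k < n - 1 := by simp at h; omega
      simp only [hk, if_false, List.length_cons, List.length_nil]
      push_cast
      rw [max_eq_right (by omega), max_eq_left (by omega)]
      ring
    · have hk : k < n - 1 := by simp at h; omega
      simp only [hk, if_pos, List.length_cons]
      push_cast
      rw [max_eq_left (by omega), max_eq_left (by omega)]
      ring

-- ===== VERDICT (by name: the statement is the Claim_ definition above) =====
theorem bitmap_text_size_py_spec : Claim_equal_bitmap_text_size_py := by
  intro text scale spacing _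
  unfold Spec_bitmap_text_size_py bitmap_text_size_py bitmap_text_size_py_alt
  have hlen : ((PySem.Str.upper text).toList.length : Int) = PySem.Str.len text := by
    simp [PySem.Str.len_eq, PySem.Str.toList_upper, PySem.Chars.upper]
  refine Prod.ext ?_ ?_
  · simp only
    rw [pvLoop_eq scale spacing (PySem.Str.len text) (PySem.Str.upper text).toList 0 0
      (by rw [hlen]; ring)]
    rw [hlen]
    ring
  · simp only
    norm_num [pvGlyphs, PySem.Dict.values]
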